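-- pv_equiv track=rewrite | github.com/jonahgaudet/Advent | Day 6 Customs.py | processAnswersA
-- ===== SOURCE A (Python) =====
-- def processAnswersA(groupInfo):
--     currentGroup = []
--     yesCount = 0
--     for line in groupInfo:
--         if line == "" or line == '\n':
--             yesCount += len(currentGroup)
--             currentGroup = []
--             continue
--         else:
--             providedAnswers = [char for char in line]
--             for answer in providedAnswers:
--                 if answer not in currentGroup:
--                     currentGroup.append(answer)
--
--     yesCount += len(currentGroup)
--
--     return yesCount
-- ===== SOURCE B (Python) =====
-- def processAnswersA(groupInfo):
--     # Two passes: split into groups, then reduce each group with a set union.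
--     groups = []
--     cur = []
--     for line in groupInfo:
--         if line == "" or line == '\n':
--             groups.append(cur)
--             cur = []
--         else:
--             cur.append(line)
--     groups.append(cur)
--     return sum(len(set(''.join(g))) for g in groups)
-- ===== Notes on version B (the rewrite author's own statement) =====
-- stated objective: faster
-- what changed: Replaces A's single pass with an incremental not-in dedup list by a two-pass shape: first split the lines into groups on blank lines, then sum len(set(''.join(g))) over the groups.
import Mathlib
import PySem

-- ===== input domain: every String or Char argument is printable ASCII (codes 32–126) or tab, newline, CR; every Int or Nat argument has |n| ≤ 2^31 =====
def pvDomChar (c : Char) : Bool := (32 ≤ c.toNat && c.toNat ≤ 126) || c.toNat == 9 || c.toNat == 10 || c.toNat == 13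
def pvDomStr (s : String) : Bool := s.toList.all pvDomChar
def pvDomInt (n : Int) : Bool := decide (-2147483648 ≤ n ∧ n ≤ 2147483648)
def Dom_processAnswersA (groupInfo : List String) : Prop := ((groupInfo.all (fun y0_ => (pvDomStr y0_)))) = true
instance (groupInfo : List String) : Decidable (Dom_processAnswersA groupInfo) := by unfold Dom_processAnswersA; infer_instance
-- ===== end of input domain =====

-- B restructures A into two passes (group the lines, then reduce each group with a set); same value everywhere, equivalence proved below.

-- ===== PORT A =====
-- the body of A's inner 'for answer' loop: append answer unless already present
def pvDedupAdd (cg : List Char) (answer : Char) : List Char :=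
  if cg.contains answer then cg else cg ++ [answer]

def processAnswersA (groupInfo : List String) : Int :=
  let st := groupInfo.foldl (fun (st : List Char × Int) line =>
    if line == "" || line == "\n" then
      ([], st.2 + (st.1.length : Int))
    else
      (line.toList.foldl pvDedupAdd st.1, st.2))
    ([], 0)
  st.2 + (st.1.length : Int)

-- ===== PORT B =====
-- ''.join(g) ported as concatenation of the lines' character lists (exact for string join)
def pvJoinChars (g : List String) : List Char := g.foldl (fun acc s => acc ++ s.toList) []

def pvSplitGroups (groupInfo : List String) : List (List String) × List String :=
  groupInfo.foldl (fun (st : List (List String) × List String) line =>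
    if line == "" || line == "\n" then (st.1 ++ [st.2], []) else (st.1, st.2 ++ [line]))
    ([], [])

def processAnswersA_alt (groupInfo : List String) : Int :=
  let st := pvSplitGroups groupInfo
  ((st.1 ++ [st.2]).map (fun g => ((PySem.Set.ofList (pvJoinChars g)).length : Int))).sum

-- ===== PRECONDITION & SPEC =====
def Spec_processAnswersA (groupInfo : List String) (out : Int) : Prop := out = processAnswersA_alt groupInfo
instance (groupInfo : List String) (out : Int) : Decidable (Spec_processAnswersA groupInfo out) := by unfold Spec_processAnswersA; infer_instance

-- ===== CLAIM (what is proved, stated in full; the proofs are below) =====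
def Claim_equal_processAnswersA : Prop := ∀ (groupInfo : List String), Dom_processAnswersA groupInfo → Spec_processAnswersA groupInfo (processAnswersA groupInfo)

-- ===== LEMMAS AND PROOFS =====

def pvSumLens (gs : List (List String)) : Int :=
  (gs.map (fun g => ((PySem.Set.ofList (pvJoinChars g)).length : Int))).sum

lemma pvJoinChars_snoc (g : List String) (s : String) :
    pvJoinChars (g ++ [s]) = pvJoinChars g ++ s.toList := by
  simp [pvJoinChars]

lemma pvSumLens_snoc (gs : List (List String)) (g : List String) :
    pvSumLens (gs ++ [g]) = pvSumLens gs + ((PySem.Set.ofList (pvJoinChars g)).length : Int) := by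
  simp [pvSumLens]

lemma inner_eq_set (cg : List Char) (cs : List Char) :
    cs.foldl pvDedupAdd cg = cs.foldl PySem.Set.add cg := by
  rfl

lemma ofList_append_chars (a b : List Char) :
    PySem.Set.ofList (a ++ b) = b.foldl PySem.Set.add (PySem.Set.ofList a) := by
  simp [PySem.Set.ofList_eq_foldl, List.foldl_append]

lemma main_loop (l : List String) (gs : List (List String)) (cur : List String) :
    (let st := l.foldl (fun (st : List Char × Int) line =>
        if line == "" || line == "\n" then
          ([], st.2 + (st.1.length : Int))
        else
          (line.toList.foldl pvDedupAdd st.1, st.2))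
        (PySem.Set.ofList (pvJoinChars cur), pvSumLens gs)
     st.2 + (st.1.length : Int))
    =
    (let st := l.foldl (fun (st : List (List String) × List String) line =>
        if line == "" || line == "\n" then (st.1 ++ [st.2], []) else (st.1, st.2 ++ [line]))
        (gs, cur)
     pvSumLens (st.1 ++ [st.2])) := by
  induction l generalizing gs cur with
  | nil =>
    simp [pvSumLens_snoc]
  | cons line rest ih =>
    simp only [List.foldl_cons]
    by_cases h : (line == "" || line == "\n") = true
    · rw [if_pos h, if_pos h]
      simpa [pvSumLens_snoc, pvJoinChars, PySem.Set.ofList] using ih (gs ++ [cur]) []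
    · rw [if_neg h, if_neg h]
      have hstep :
          line.toList.foldl pvDedupAdd (PySem.Set.ofList (pvJoinChars cur))
            = PySem.Set.ofList (pvJoinChars (cur ++ [line])) := by
        rw [inner_eq_set, pvJoinChars_snoc, ofList_append_chars]
      rw [hstep]
      exact ih gs (cur ++ [line])

-- ===== VERDICT (by name: the statement is the Claim_ definition above) =====
theorem processAnswersA_spec : Claim_equal_processAnswersA := by
  intro groupInfo _
  unfold Spec_processAnswersA processAnswersA processAnswersA_alt pvSplitGroups
  simpa [pvJoinChars, pvSumLens, PySem.Set.ofList] using
    main_loop groupInfo [] []
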